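-- pv_equiv track=rewrite | github.com/SleepyAO-DT/Chaos-Based-Two-Wheels-Robot | auto.py | find_candidate_valleys
-- ===== SOURCE A (Python) =====
-- def find_candidate_valleys(histogram, threshold):
--     """寻找候选山谷"""
--     valleys = []
--     n = len(histogram)
--
--     i = 0
--     while i < n:
--         # 寻找连续的低密度扇区
--         if histogram[i] < threshold:
--             start = i
--             # 计算连续低密度扇区的长度
--             while i < n and histogram[i] < threshold:
--                 i += 1
--             end = i - 1
--
--             # 计算山谷大小
--             size = (end - start + 1) % n
--             if size > 0:
--                 valleys.append({
--                     'start': start,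
--                     'end': end,
--                     'size': size,
--                     'center': (start + end) // 2
--                 })
--         else:
--             i += 1
--
--     # 处理环形边界
--     if len(valleys) > 1 and valleys[0]['start'] == 0 and valleys[-1]['end'] == n-1:
--         # 合并首尾山谷
--         merged_valley = {
--             'start': valleys[-1]['start'],
--             'end': valleys[0]['end'] + n,
--             'size': valleys[-1]['size'] + valleys[0]['size'],
--             'center': (valleys[-1]['center'] + valleys[0]['center']) % n // 2
--         }
--         valleys = [merged_valley] + valleys[1:-1]
--
--     return valleys
-- ===== SOURCE B (Python) =====
-- def find_candidate_valleys(histogram, threshold):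
--     """Boundary detection: run starts and ends as two filtered index lists, zipped."""
--     n = len(histogram)
--     low = [h < threshold for h in histogram]
--     starts = [i for i in range(n) if low[i] and (i == 0 or not low[i - 1])]
--     ends = [i for i in range(n) if low[i] and (i == n - 1 or not low[i + 1])]
--     valleys = [{'start': s, 'end': e, 'size': (e - s + 1) % n,
--                 'center': (s + e) // 2}
--                for s, e in zip(starts, ends) if (e - s + 1) % n > 0]
--     if len(valleys) > 1 and valleys[0]['start'] == 0 and valleys[-1]['end'] == n - 1:
--         merged = {'start': valleys[-1]['start'],
--                   'end': valleys[0]['end'] + n,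
--                   'size': valleys[-1]['size'] + valleys[0]['size'],
--                   'center': (valleys[-1]['center'] + valleys[0]['center']) % n // 2}
--         valleys = [merged] + valleys[1:-1]
--     return valleys
-- ===== Notes on version B (the rewrite author's own statement) =====
-- stated objective: alternative
-- what changed: Replaces A's nested stateful while-loop scan by boundary detection: run starts and run ends are computed as two independently filtered index lists (neighbour comparison), zipped into runs, and the valleys built by a comprehension; the wraparound merge is kept.
import Mathlib
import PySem

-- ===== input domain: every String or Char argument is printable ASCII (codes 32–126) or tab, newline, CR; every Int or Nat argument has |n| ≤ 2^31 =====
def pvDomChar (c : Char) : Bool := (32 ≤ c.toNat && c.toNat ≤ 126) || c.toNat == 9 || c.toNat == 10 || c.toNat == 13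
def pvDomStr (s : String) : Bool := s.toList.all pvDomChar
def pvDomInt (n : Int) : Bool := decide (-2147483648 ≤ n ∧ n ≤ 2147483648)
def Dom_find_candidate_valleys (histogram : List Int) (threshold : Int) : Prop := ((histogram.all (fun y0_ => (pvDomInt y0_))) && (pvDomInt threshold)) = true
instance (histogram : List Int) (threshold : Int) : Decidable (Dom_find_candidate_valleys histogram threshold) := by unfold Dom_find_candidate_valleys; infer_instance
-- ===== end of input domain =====

-- B replaces A's nested stateful while-loop scan by boundary detection: run starts and
-- run ends are two independently filtered index lists, zipped into runs (objective:
-- an alternative decomposition; same O(n) cost).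

-- shared helper: the valley dict literal {'start':…,'end':…,'size':…,'center':…}
def mkValley (s e sz c : Int) : List (String × Int) :=
  [("start", s), ("end", e), ("size", sz), ("center", c)]

-- shared helper: v[k] (the key is always present in every dict either program builds)
def vget (v : List (String × Int)) (k : String) : Int :=
  match v.find? (fun kv => kv.1 == k) with
  | some kv => kv.2
  | none => 0

-- shared helper: the final wraparound-merge block (textually identical in A and in B)
def mergeWrap (n : Int) (valleys : List (List (String × Int))) : List (List (String × Int)) :=
  if valleys.length > 1 ∧ vget (PySem.List.pyGetD valleys 0 []) "start" = 0 ∧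
      vget (PySem.List.pyGetD valleys (-1) []) "end" = n - 1 then
    let first := PySem.List.pyGetD valleys 0 []
    let last := PySem.List.pyGetD valleys (-1) []
    mkValley (vget last "start") (vget first "end" + n) (vget last "size" + vget first "size")
        (PySem.Int.floordiv (PySem.Int.mod (vget last "center" + vget first "center") n) 2)
      :: PySem.List.slice valleys (some 1) (some (-1))
  else valleys

-- ===== PORT A =====
-- inner while: i += 1 while i < n and histogram[i] < threshold
def pvSkip (hist : List Int) (t : Int) (i : Nat) : Nat :=
  if _h : i < hist.length ∧ hist.getD i 0 < t then pvSkip hist t (i + 1) else i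
termination_by hist.length - i
decreasing_by omega

theorem pvSkip_ge (hist : List Int) (t : Int) (i : Nat) : i ≤ pvSkip hist t i := by
  fun_induction pvSkip <;> omega

-- outer while loop of A (append-to-a-list loop written as list-producing recursion)
def pvLoopA (hist : List Int) (t : Int) (i : Nat) : List (List (String × Int)) :=
  if h : i < hist.length then
    if hl : hist.getD i 0 < t then
      let j := pvSkip hist t i
      let e : Int := (j : Int) - 1
      let size := PySem.Int.mod (e - (i : Int) + 1) (hist.length : Int)
      let rest := pvLoopA hist t j
      if size > 0 then
        mkValley (i : Int) e size (PySem.Int.floordiv ((i : Int) + e) 2) :: rest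
      else rest
    else pvLoopA hist t (i + 1)
  else []
termination_by hist.length - i
decreasing_by
  · have h1 : pvSkip hist t i = pvSkip hist t (i + 1) := by
      rw [pvSkip, dif_pos ⟨h, hl⟩]
    have h2 := pvSkip_ge hist t (i + 1)
    omega
  · omega

def find_candidate_valleys (histogram : List Int) (threshold : Int) : List (List (String × Int)) :=
  mergeWrap (histogram.length : Int) (pvLoopA histogram threshold 0)

-- ===== PORT B =====
-- B's valley comprehension over the (start, end) run pairs
def valleyMap (n : Int) (rs : List (Int × Int)) : List (List (String × Int)) :=
  (rs.filter (fun se => decide (0 < PySem.Int.mod (se.2 - se.1 + 1) n))).map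
    (fun se => mkValley se.1 se.2 (PySem.Int.mod (se.2 - se.1 + 1) n)
      (PySem.Int.floordiv (se.1 + se.2) 2))

-- In B's Python, 'i == 0 or not low[i-1]' / 'i == n-1 or not low[i+1]' short-circuit, so the
-- out-of-range lookup is never evaluated; pyGetD with default false gives the same VALUE there
-- (the first disjunct is already true), hence this port is exact.
def find_candidate_valleys_alt (histogram : List Int) (threshold : Int) : List (List (String × Int)) :=
  let n : Int := (histogram.length : Int)
  let low := histogram.map (fun h => decide (h < threshold))
  let starts := (PySem.List.pyRange 0 n 1).filter
      (fun i => PySem.List.pyGetD low i false && (i == 0 || !(PySem.List.pyGetD low (i-1) false)))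
  let ends := (PySem.List.pyRange 0 n 1).filter
      (fun i => PySem.List.pyGetD low i false && (i == n - 1 || !(PySem.List.pyGetD low (i+1) false)))
  mergeWrap n (valleyMap n (starts.zip ends))

-- ===== PRECONDITION & SPEC =====
def Spec_find_candidate_valleys (histogram : List Int) (threshold : Int) (out : List (List (String × Int))) : Prop := out = find_candidate_valleys_alt histogram threshold
instance (histogram : List Int) (threshold : Int) (out : List (List (String × Int))) : Decidable (Spec_find_candidate_valleys histogram threshold out) := by unfold Spec_find_candidate_valleys; infer_instance

-- ===== CLAIM (what is proved, stated in full; the proofs are below) =====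
def Claim_equal_find_candidate_valleys : Prop := ∀ (histogram : List Int) (threshold : Int), Dom_find_candidate_valleys histogram threshold → Spec_find_candidate_valleys histogram threshold (find_candidate_valleys histogram threshold)

-- ===== LEMMAS AND PROOFS =====

-- canonical run decomposition of a boolean mask, starting at absolute index k
def runsRec (mask : List Bool) (k : Int) : List (Int × Int) :=
  match mask with
  | [] => []
  | false :: rest => runsRec rest (k + 1)
  | true :: rest =>
      (k, k + (rest.takeWhile id).length) ::
        runsRec (rest.dropWhile id) (k + 1 + (rest.takeWhile id).length)
termination_by mask.length
decreasing_by
  · simp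
  · have := (List.dropWhile_sublist (p := id) (l := rest)).length_le
    simp; omega

-- mask of the histogram
def maskOf (hist : List Int) (t : Int) : List Bool := hist.map (fun h => decide (h < t))

theorem skip_spec (hist : List Int) (t : Int) (i : Nat) :
    pvSkip hist t i = i + (((maskOf hist t).drop i).takeWhile id).length ∧
      (maskOf hist t).drop (pvSkip hist t i) = ((maskOf hist t).drop i).dropWhile id := by
  fun_induction pvSkip with
  | case1 i h ih =>
      obtain ⟨hi, hl⟩ := h
      have hdrop : (maskOf hist t).drop i = true :: (maskOf hist t).drop (i + 1) := by
        have hm : (maskOf hist t).length = hist.length := by simp [maskOf]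
        rw [List.drop_eq_getElem_cons (by omega)]
        congr 1
        simp [maskOf]
        have : hist[i]'hi = hist.getD i 0 := by simp [List.getD, List.getElem?_eq_getElem hi]
        rw [this]; simpa using hl
      rw [hdrop]
      simp only [List.takeWhile, List.dropWhile, id] at *
      constructor
      · rw [ih.1]; simp; omega
      · exact ih.2
  | case2 i h =>
      by_cases hi : i < hist.length
      · have hl : ¬ hist.getD i 0 < t := by tauto
        have hdrop : (maskOf hist t).drop i = false :: (maskOf hist t).drop (i + 1) := by
          rw [List.drop_eq_getElem_cons (by simp [maskOf]; omega)]
          congr 1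
          simp [maskOf]
          have : hist[i]'hi = hist.getD i 0 := by simp [List.getD, List.getElem?_eq_getElem hi]
          rw [this]; simpa using hl
        rw [hdrop]
        simp [List.takeWhile, List.dropWhile]
      · have : (maskOf hist t).drop i = [] := by
          apply List.drop_eq_nil_of_le; simp [maskOf]; omega
        simp [this]

theorem loopA_spec (hist : List Int) (t : Int) (i : Nat) :
    pvLoopA hist t i =
      valleyMap (hist.length : Int) (runsRec ((maskOf hist t).drop i) (i : Int)) := by
  have hmask : ∀ m : Nat, m < hist.length → (hi : m < hist.length) →
      (maskOf hist t).drop m = decide (hist.getD m 0 < t) :: (maskOf hist t).drop (m + 1) := by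
    intro m hm hi
    rw [List.drop_eq_getElem_cons (by simp [maskOf]; omega)]
    congr 1
    simp [maskOf]
    simp [List.getElem?_eq_getElem hi]
  have key : ∀ (i : Nat), i < hist.length → hist.getD i 0 < t →
      runsRec ((maskOf hist t).drop i) (i : Int) =
        ((i : Int), (pvSkip hist t i : Int) - 1) ::
          runsRec ((maskOf hist t).drop (pvSkip hist t i)) ((pvSkip hist t i : Int)) := by
    intro i h hl
    have hs1 := skip_spec hist t (i + 1)
    have hskip1 : pvSkip hist t i = pvSkip hist t (i + 1) := by
      rw [pvSkip, dif_pos ⟨h, hl⟩]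
    have hj1 : i + 1 ≤ pvSkip hist t (i + 1) := pvSkip_ge hist t (i + 1)
    have hdrop : (maskOf hist t).drop i = true :: (maskOf hist t).drop (i + 1) := by
      rw [hmask i h h, decide_eq_true hl]
    rw [hdrop]
    simp only [runsRec]
    rw [hskip1, hs1.2]
    congr 2
    · rw [hs1.1]; push_cast; ring
    · rw [hs1.1]; push_cast; ring
  fun_induction pvLoopA with
  | case1 i h hl j e size rest hpos ih =>
      rw [key i h hl]
      simp only [valleyMap, List.filter_cons]
      have : decide (0 < PySem.Int.mod ((pvSkip hist t i : Int) - 1 - (i : Int) + 1)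
          (hist.length : Int)) = true := by
        simp only [decide_eq_true_eq]
        show 0 < size
        exact hpos
      rw [this]
      exact congrArg _ ih
  | case2 i h hl j e size rest hpos ih =>
      rw [key i h hl]
      simp only [valleyMap, List.filter_cons]
      have : decide (0 < PySem.Int.mod ((pvSkip hist t i : Int) - 1 - (i : Int) + 1)
          (hist.length : Int)) = false := by
        simp only [decide_eq_false_iff_not]
        show ¬ 0 < size
        exact hpos
      rw [this]
      exact ih
  | case3 i h hl ih =>
      have hdrop : (maskOf hist t).drop i = false :: (maskOf hist t).drop (i + 1) := by
        rw [hmask i h h, decide_eq_false hl]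
      have hcast : ((i : Int) + 1) = ((i + 1 : Nat) : Int) := by push_cast; ring
      rw [hdrop]
      simp only [runsRec]
      rw [hcast]
      exact ih
  | case4 i h =>
      have : (maskOf hist t).drop i = [] := by
        apply List.drop_eq_nil_of_le; simp [maskOf]; omega
      simp [this, runsRec, valleyMap]

-- B side: recursive characterisations of the start-index and end-index lists
def recS (prev : Bool) (mask : List Bool) (k : Int) : List Int :=
  match mask with
  | [] => []
  | b :: rest => (if b && !prev then [k] else []) ++ recS b rest (k + 1)

def recE (mask : List Bool) (k : Int) : List Int :=
  match mask with
  | [] => []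
  | b :: rest => (if b && !(rest.headD false) then [k] else []) ++ recE rest (k + 1)

theorem filter_starts (full : List Bool) (k : Nat) (hk : k ≤ full.length) :
    (PySem.List.pyRange (k : Int) (full.length : Int) 1).filter
      (fun i => PySem.List.pyGetD full i false &&
        (i == 0 || !(PySem.List.pyGetD full (i - 1) false))) =
    recS (if k = 0 then false else full.getD (k - 1) false) (full.drop k) (k : Int) := by
  have main : ∀ (d k : Nat), full.length ≤ k + d → k ≤ full.length →
      (PySem.List.pyRange (k : Int) (full.length : Int) 1).filter
        (fun i => PySem.List.pyGetD full i false &&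
          (i == 0 || !(PySem.List.pyGetD full (i - 1) false))) =
      recS (if k = 0 then false else full.getD (k - 1) false) (full.drop k) (k : Int) := by
    intro d
    induction d with
    | zero =>
        intro k hd hle
        have hkl : k = full.length := by omega
        rw [PySem.List.pyRange_one_eq_nil (by omega), List.filter_nil,
          List.drop_of_length_le (by omega)]
        simp [recS]
    | succ d ih =>
        intro k hd hle
        by_cases hkl : k < full.length
        · rw [PySem.List.pyRange_one_cons (by exact_mod_cast hkl), List.filter_cons]
          have hdrop : full.drop k = full.getD k false :: full.drop (k + 1) := by
            rw [List.drop_eq_getElem_cons hkl]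
            simp [List.getD, List.getElem?_eq_getElem hkl]
          have hIH := ih (k + 1) (by omega) (by omega)
          have hcast : ((k : Int) + 1) = ((k + 1 : Nat) : Int) := by push_cast; ring
          have hpred : (PySem.List.pyGetD full (k : Int) false &&
              ((k : Int) == 0 || !(PySem.List.pyGetD full ((k : Int) - 1) false))) =
              (full.getD k false && !(if k = 0 then false else full.getD (k - 1) false)) := by
            by_cases h0 : k = 0
            · subst h0; simp [PySem.List.pyGetD_zero, List.getD]
            · have h1 : ((k : Int) == 0) = false := by
                simp only [beq_eq_false_iff_ne, ne_eq]
                omega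
              have h2 : (k : Int) - 1 = ((k - 1 : Nat) : Int) := by omega
              rw [h1, h2, if_neg h0]
              simp
          rw [if_neg (Nat.succ_ne_zero k)] at hIH
          simp only [Nat.add_sub_cancel] at hIH
          rw [← hcast] at hIH
          rw [hdrop]
          simp only [recS]
          rw [← hIH, hpred]
          by_cases hb : (full.getD k false && !(if k = 0 then false else full.getD (k - 1) false)) = true
          · rw [hb]; simp
          · rw [eq_false_of_ne_true hb]; simp
        · have hkl' : k = full.length := by omega
          rw [PySem.List.pyRange_one_eq_nil (by omega), List.filter_nil,
            List.drop_of_length_le (by omega)]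
          simp [recS]
  exact main full.length k (by omega) hk

theorem filter_ends (full : List Bool) (k : Nat) (hk : k ≤ full.length) :
    (PySem.List.pyRange (k : Int) (full.length : Int) 1).filter
      (fun i => PySem.List.pyGetD full i false &&
        (i == (full.length : Int) - 1 || !(PySem.List.pyGetD full (i + 1) false))) =
    recE (full.drop k) (k : Int) := by
  have main : ∀ (d k : Nat), full.length ≤ k + d → k ≤ full.length →
      (PySem.List.pyRange (k : Int) (full.length : Int) 1).filter
        (fun i => PySem.List.pyGetD full i false &&
          (i == (full.length : Int) - 1 || !(PySem.List.pyGetD full (i + 1) false))) =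
      recE (full.drop k) (k : Int) := by
    intro d
    induction d with
    | zero =>
        intro k hd hle
        rw [PySem.List.pyRange_one_eq_nil (by omega), List.filter_nil,
          List.drop_of_length_le (by omega)]
        simp [recE]
    | succ d ih =>
        intro k hd hle
        by_cases hkl : k < full.length
        · rw [PySem.List.pyRange_one_cons (by exact_mod_cast hkl), List.filter_cons]
          have hdrop : full.drop k = full.getD k false :: full.drop (k + 1) := by
            rw [List.drop_eq_getElem_cons hkl]
            simp [List.getD, List.getElem?_eq_getElem hkl]
          have hIH := ih (k + 1) (by omega) (by omega)
          have hcast : ((k : Int) + 1) = ((k + 1 : Nat) : Int) := by push_cast; ring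
          have hhead : (full.drop (k + 1)).headD false = full.getD (k + 1) false := by
            by_cases h1 : k + 1 < full.length
            · rw [List.drop_eq_getElem_cons h1]
              simp [List.getD, List.getElem?_eq_getElem h1]
            · rw [List.drop_of_length_le (by omega)]
              rw [List.getD_eq_getElem?_getD, List.getElem?_eq_none (by omega)]
              rfl
          have hpred : (PySem.List.pyGetD full (k : Int) false &&
              ((k : Int) == (full.length : Int) - 1 ||
                !(PySem.List.pyGetD full ((k : Int) + 1) false))) =
              (full.getD k false && !((full.drop (k + 1)).headD false)) := by
            rw [hhead, hcast]
            by_cases hlast : k + 1 = full.length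
            · have h1 : ((k : Int) == (full.length : Int) - 1) = true := by
                simp only [beq_iff_eq]; omega
              have h2 : full.getD (k + 1) false = false := by
                rw [List.getD_eq_getElem?_getD, List.getElem?_eq_none (by omega)]
                rfl
              rw [h1, h2]
              simp
            · have h1 : ((k : Int) == (full.length : Int) - 1) = false := by
                simp only [beq_eq_false_iff_ne, ne_eq]; omega
              have h3 : PySem.List.pyGetD full (((k + 1 : Nat) : Int)) false =
                  full.getD (k + 1) false := by
                rw [PySem.List.pyGetD_natCast]
              rw [h1, h3]
              simp
          rw [← hcast] at hIH
          rw [hdrop]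
          simp only [recE]
          rw [← hIH, hpred]
          by_cases hb : (full.getD k false && !((full.drop (k + 1)).headD false)) = true
          · rw [hb]; simp
          · rw [eq_false_of_ne_true hb]; simp
        · rw [PySem.List.pyRange_one_eq_nil (by omega), List.filter_nil,
            List.drop_of_length_le (by omega)]
          simp [recE]
  exact main full.length k (by omega) hk

theorem recS_run (rest : List Bool) : ∀ (k : Int),
    recS true rest k = recS false (rest.dropWhile id) (k + (rest.takeWhile id).length) := by
  induction rest with
  | nil => intro k; simp [recS]
  | cons b t ih =>
      intro k
      cases b with
      | false => simp [recS, List.takeWhile, List.dropWhile]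
      | true =>
          simp only [recS, List.takeWhile, List.dropWhile, id]
          rw [ih (k+1)]
          simp
          ring_nf

theorem recE_run (rest : List Bool) : ∀ (k : Int),
    recE (true :: rest) k = (k + (rest.takeWhile id).length) ::
      recE (rest.dropWhile id) (k + 1 + (rest.takeWhile id).length) := by
  induction rest with
  | nil => intro k; simp [recE]
  | cons b t ih =>
      intro k
      cases b with
      | false => simp [recE, List.takeWhile, List.dropWhile]
      | true =>
          simp only [recE, List.takeWhile, List.dropWhile, id] at *
          rw [ih (k+1)]
          simp
          constructor <;> ring_nf

theorem zip_runs (mask : List Bool) (k : Int) :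
    (recS false mask k).zip (recE mask k) = runsRec mask k := by
  fun_induction runsRec with
  | case1 => simp [recS, recE]
  | case2 k rest ih => simpa [recS, recE] using ih
  | case3 k rest ih =>
      rw [show recS false (true :: rest) k = k :: recS false (rest.dropWhile id)
          ((k+1) + (rest.takeWhile id).length) from by
        simp [recS, recS_run rest (k+1)],
        recE_run rest k]
      simp only [List.zip_cons_cons, ih]

-- ===== VERDICT (by name: the statement is the Claim_ definition above) =====
theorem find_candidate_valleys_spec : Claim_equal_find_candidate_valleys := by
  intro hist t _
  unfold Spec_find_candidate_valleys find_candidate_valleys find_candidate_valleys_alt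
  rw [loopA_spec hist t 0]
  simp only [List.drop_zero, Nat.cast_zero]
  have hlow : hist.map (fun h => decide (h < t)) = maskOf hist t := rfl
  have hlen : (maskOf hist t).length = hist.length := by simp [maskOf]
  rw [hlow]
  congr 1
  congr 1
  rw [← zip_runs (maskOf hist t) 0]
  congr 1
  · have := filter_starts (maskOf hist t) 0 (by omega)
    simp only [Nat.cast_zero, List.drop_zero, hlen] at this
    exact this.symm
  · have := filter_ends (maskOf hist t) 0 (by omega)
    simp only [Nat.cast_zero, List.drop_zero, hlen] at this
    exact this.symm
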